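-- pv_equiv track=rewrite | github.com/epsilonxe/python_boyband | codes/demo_input.py | areMyInputsOkay
-- ===== SOURCE A (Python) =====
-- def isMyInputOkay(x):
-- 	if isinstance(x, str):
-- 		text = ''
-- 		if x.isdigit():
-- 			text = 'OK'
-- 		elif '.' in x:
-- 			sx = x.split('.')
-- 			n = len(sx)
-- 			if n > 2:
-- 				text = 'NOT OK'
-- 			elif n == 2:
-- 				frontx = sx[0]
-- 				backx = sx[1]
-- 				if frontx.isdigit() and backx.isdigit():
-- 					text = 'OK'
-- 				elif frontx.isdigit() and backx == '':
-- 					text = 'OK'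
-- 				elif backx.isdigit() and frontx == '':
-- 					text = 'OK'
-- 				else:
-- 					text = 'NOT OK'
-- 			elif n == 1:
-- 				text = 'NOT OK'
-- 			elif n == 0:
-- 				pass
-- 		else:
-- 			text = 'NOT OK'
-- 	if text == 'OK':
-- 		return True
-- 	else:
-- 		return False
--
-- def areMyInputsOkay(long_string):
-- 	x = long_string.split()
-- 	n = len(x)
-- 	if n > 0:
-- 		all_okay = True
-- 		for i in x:
-- 			if not isMyInputOkay(i):
-- 				all_okay = False
-- 		return all_okay
-- 	elif n == 1:
-- 		return isMyInputOkay(long_string)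
-- 	else:
-- 		return False
-- ===== SOURCE B (Python) =====
-- def areMyInputsOkay(long_string):
--     tokens = long_string.split()
--     return len(tokens) > 0 and all(t.replace('.', '', 1).isdigit() for t in tokens)
-- ===== Notes on version B (the rewrite author's own statement) =====
-- stated objective: simpler
-- what changed: Replaced the two-function decision tree (digit check, split on the dot with a six-way branch on part counts and emptiness, a text status flag, and a boolean accumulator loop) by one expression: a token is numeric iff deleting at most one dot leaves a nonempty all-digit string, folded over all tokens with all().
import Mathlib
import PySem

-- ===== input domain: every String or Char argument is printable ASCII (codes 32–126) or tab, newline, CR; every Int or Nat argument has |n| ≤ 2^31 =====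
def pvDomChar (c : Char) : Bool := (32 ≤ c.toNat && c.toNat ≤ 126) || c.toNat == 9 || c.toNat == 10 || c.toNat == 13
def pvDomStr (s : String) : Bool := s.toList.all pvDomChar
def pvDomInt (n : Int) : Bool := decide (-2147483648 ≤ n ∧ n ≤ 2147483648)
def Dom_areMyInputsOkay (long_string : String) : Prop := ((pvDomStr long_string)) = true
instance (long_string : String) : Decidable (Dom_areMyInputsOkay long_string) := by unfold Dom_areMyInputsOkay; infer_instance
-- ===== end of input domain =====

-- B replaces A's two-function split('.')-and-branch decision tree by one expression per
-- token ("delete at most one dot, then isdigit"); same return value, simpler decomposition.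

-- ===== PORT A =====
-- port of the helper isMyInputOkay; its argument is always a str here, so the
-- isinstance(x, str) guard is always true and `text` is always initialised.
def isMyInputOkay (x : String) : Bool :=
  let text : String :=
    if PySem.Str.strIsdigit x then "OK"
    else if PySem.Str.isIn "." x then
      -- x.split('.'): the separator is the nonempty literal '.', so the sep ≠ '' form
      -- PySem.Chars.splitOn is exact here.
      let sx : List (List Char) := PySem.Chars.splitOn x.toList ['.']
      let n := sx.length
      if n > 2 then "NOT OK"
      else if n = 2 then
        -- sx[0] / sx[1]: always in range because n = 2 on this branch
        let frontx := sx.getD 0 []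
        let backx := sx.getD 1 []
        if PySem.Chars.strIsdigit frontx && PySem.Chars.strIsdigit backx then "OK"
        else if PySem.Chars.strIsdigit frontx && backx == [] then "OK"
        else if PySem.Chars.strIsdigit backx && frontx == [] then "OK"
        else "NOT OK"
      else if n = 1 then "NOT OK"
      else ""   -- n == 0: pass, text stays ''
    else "NOT OK"
  text == "OK"

def areMyInputsOkay (long_string : String) : Bool :=
  let x := PySem.Str.split₀ long_string
  let n := x.length
  if n > 0 then
    x.foldl (fun all_okay i => if !(isMyInputOkay i) then false else all_okay) true
  else if n = 1 then isMyInputOkay long_string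
  else false

-- ===== PORT B =====
-- hand port of t.replace('.', '', 1): old is the single character '.' and count is 1,
-- so it removes the first '.' if any; exact for this call.
def pvDropFirstDot : List Char → List Char
  | [] => []
  | c :: rest => if c = '.' then rest else c :: pvDropFirstDot rest

def areMyInputsOkay_alt (long_string : String) : Bool :=
  let tokens := PySem.Str.split₀ long_string
  decide (tokens.length > 0) && tokens.all (fun t => PySem.Chars.strIsdigit (pvDropFirstDot t.toList))

-- ===== PRECONDITION & SPEC =====
def Spec_areMyInputsOkay (long_string : String) (out : Bool) : Prop := out = areMyInputsOkay_alt long_string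
instance (long_string : String) (out : Bool) : Decidable (Spec_areMyInputsOkay long_string out) := by unfold Spec_areMyInputsOkay; infer_instance

-- ===== CLAIM (what is proved, stated in full; the proofs are below) =====
def Claim_equal_areMyInputsOkay : Prop := ∀ (long_string : String), Dom_areMyInputsOkay long_string → Spec_areMyInputsOkay long_string (areMyInputsOkay long_string)

-- ===== LEMMAS AND PROOFS =====

-- structural form of x.split('.')
def pvSplitDot (pre : List Char) : List Char → List (List Char)
  | [] => [pre]
  | c :: rest => if c = '.' then pre :: pvSplitDot [] rest else pvSplitDot (pre ++ [c]) rest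

theorem pv_go_eq (fuel : Nat) : ∀ (l cur : List Char) (accs : List (List Char)),
    l.length < fuel →
    PySem.Chars.splitOn.go ['.'] fuel l cur accs = accs.reverse ++ pvSplitDot cur.reverse l := by
  induction fuel with
  | zero => intro l cur accs h; omega
  | succ fuel ih =>
    intro l cur accs h
    cases l with
    | nil => simp [PySem.Chars.splitOn.go, pvSplitDot]
    | cons c rest =>
      rw [PySem.Chars.splitOn.go]
      simp only [List.length_cons] at h
      by_cases hc : c = '.'
      · subst hc
        simp only [List.isPrefixOf, beq_self_eq_true, Bool.true_and, if_pos]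
        rw [ih _ _ _ (by simp; omega)]
        simp [pvSplitDot]
      · have hp : (['.'].isPrefixOf (c :: rest)) = false := by
          simp only [List.isPrefixOf, Bool.and_true, beq_eq_false_iff_ne, ne_eq]
          exact fun h' => hc h'.symm
        rw [hp]
        simp only [Bool.false_eq_true, if_false]
        rw [ih _ _ _ (by omega)]
        simp [pvSplitDot, hc]

theorem pv_splitOn_eq (cs : List Char) :
    PySem.Chars.splitOn cs ['.'] = pvSplitDot [] cs := by
  rw [PySem.Chars.splitOn, pv_go_eq _ _ _ _ (by omega)]
  simp

theorem pv_isIn_dot (x : String) :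
    PySem.Str.isIn "." x = x.toList.contains '.' := by
  by_cases h : '.' ∈ x.toList
  · rw [List.contains_eq_mem]
    simp only [h, decide_true]
    rw [PySem.Str.isIn_iff_infix]
    obtain ⟨u,v,huv⟩ := List.append_of_mem h
    exact ⟨u, v, by simpa using huv.symm⟩
  · rw [List.contains_eq_mem]
    simp only [h, decide_false]
    rw [← Bool.not_eq_true, PySem.Str.isIn_iff_infix]
    intro hinf
    exact h (hinf.mem (by simp))

theorem pv_dropFirstDot_of_not_mem {l : List Char} (h : '.' ∉ l) : pvDropFirstDot l = l := by
  induction l with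
  | nil => rfl
  | cons c rest ih =>
    simp only [List.mem_cons, not_or] at h
    simp only [pvDropFirstDot, ih h.2]
    rw [if_neg (fun hc => h.1 hc.symm)]

theorem pv_splitDot_of_not_mem (pre : List Char) {l : List Char} (h : '.' ∉ l) :
    pvSplitDot pre l = [pre ++ l] := by
  induction l generalizing pre with
  | nil => simp [pvSplitDot]
  | cons c rest ih =>
    simp only [List.mem_cons, not_or] at h
    rw [pvSplitDot, if_neg (fun hc => h.1 hc.symm), ih _ h.2]
    simp

theorem pv_splitDot_append (f : List Char) (hf : '.' ∉ f) (pre b : List Char) :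
    pvSplitDot pre (f ++ '.' :: b) = (pre ++ f) :: pvSplitDot [] b := by
  induction f generalizing pre with
  | nil => simp [pvSplitDot]
  | cons c rest ih =>
    simp only [List.mem_cons, not_or] at hf
    rw [List.cons_append, pvSplitDot, if_neg (fun hc => hf.1 hc.symm), ih hf.2]
    simp

theorem pv_dropFirstDot_append (f : List Char) (hf : '.' ∉ f) (b : List Char) :
    pvDropFirstDot (f ++ '.' :: b) = f ++ b := by
  induction f with
  | nil => simp [pvDropFirstDot]
  | cons c rest ih =>
    simp only [List.mem_cons, not_or] at hf
    rw [List.cons_append, pvDropFirstDot, if_neg (fun hc => hf.1 hc.symm), ih hf.2]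
    rfl

theorem pv_splitDot_ne_nil (pre : List Char) (l : List Char) : pvSplitDot pre l ≠ [] := by
  induction l generalizing pre with
  | nil => simp [pvSplitDot]
  | cons c rest ih =>
    rw [pvSplitDot]
    split
    · simp
    · exact ih _

theorem pv_two_le_splitDot (pre : List Char) {l : List Char} (h : '.' ∈ l) :
    2 ≤ (pvSplitDot pre l).length := by
  induction l generalizing pre with
  | nil => simp at h
  | cons c rest ih =>
    rw [pvSplitDot]
    by_cases hc : c = '.'
    · rw [if_pos hc]
      have h1 : 1 ≤ (pvSplitDot ([] : List Char) rest).length :=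
        List.length_pos_of_ne_nil (pv_splitDot_ne_nil [] rest)
      simp only [List.length_cons]; omega
    · rw [if_neg hc]
      rcases List.mem_cons.mp h with h1 | h2
      · exact absurd h1.symm hc
      · exact ih _ h2

theorem pv_strIsdigit_of_mem_dot {l : List Char} (h : '.' ∈ l) :
    PySem.Chars.strIsdigit l = false := by
  rw [PySem.Chars.strIsdigit]
  simp only [Bool.and_eq_false_iff]
  right
  rw [List.all_eq_false]
  exact ⟨'.', h, by decide⟩

theorem pv_first_dot {l : List Char} (h : '.' ∈ l) :
    ∃ f b, l = f ++ '.' :: b ∧ '.' ∉ f := by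
  induction l with
  | nil => simp at h
  | cons c rest ih =>
    by_cases hc : c = '.'
    · exact ⟨[], rest, by simp [hc], by simp⟩
    · rcases List.mem_cons.mp h with h1 | h2
      · exact absurd h1.symm hc
      · obtain ⟨f, b, rfl, hf⟩ := ih h2
        exact ⟨c :: f, b, rfl, by simp [hf]; exact fun hc' => hc hc'.symm⟩

-- the per-token equivalence: A's decision tree equals "delete first dot, then isdigit"
theorem pv_token (t : String) :
    isMyInputOkay t = PySem.Chars.strIsdigit (pvDropFirstDot t.toList) := by
  rw [isMyInputOkay]
  simp only [PySem.Str.strIsdigit_eq]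
  by_cases hm : '.' ∈ t.toList
  · have hd : PySem.Chars.strIsdigit t.toList = false := pv_strIsdigit_of_mem_dot hm
    have hin : PySem.Str.isIn "." t = true := by
      rw [pv_isIn_dot, List.contains_eq_mem]; simp [hm]
    simp only [hd, Bool.false_eq_true, if_false, hin, if_true]
    obtain ⟨f, b, heq, hf⟩ := pv_first_dot hm
    rw [heq, pv_splitOn_eq, pv_splitDot_append f hf, pv_dropFirstDot_append f hf]
    by_cases hb : '.' ∈ b
    · have h2 := pv_two_le_splitDot ([] : List Char) hb
      rw [if_pos (by simp only [List.length_cons]; omega)]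
      rw [pv_strIsdigit_of_mem_dot (show ('.' : Char) ∈ f ++ b by simp [hb])]
      decide
    · rw [pv_splitDot_of_not_mem ([] : List Char) hb]
      simp only [List.nil_append]
      rw [if_neg (show ¬ ([f, b] : List (List Char)).length > 2 by simp)]
      rw [if_pos (show ([f, b] : List (List Char)).length = 2 by simp)]
      simp only [List.getD_cons_zero, List.getD_cons_succ]
      rcases f with _ | ⟨c, cs⟩ <;> rcases b with _ | ⟨e, es⟩ <;>
        simp [PySem.Chars.strIsdigit, List.all_append] <;>
        split_ifs <;> simp_all [List.all_eq_true]
  · rw [pv_dropFirstDot_of_not_mem hm]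
    have hin : PySem.Str.isIn "." t = false := by
      rw [pv_isIn_dot, List.contains_eq_mem]; simp [hm]
    have hin' : PySem.Chars.isIn ['.'] t.toList = false := by simpa using hin
    by_cases hd : PySem.Chars.strIsdigit t.toList
    · simp [hd]
    · simp only [Bool.not_eq_true] at hd
      simp [hd, hin']

-- A's boolean-accumulator loop is List.all
theorem pv_fold_all (ok : String → Bool) (l : List String) (acc : Bool) :
    l.foldl (fun all_okay i => if !(ok i) then false else all_okay) acc = (acc && l.all ok) := by
  induction l generalizing acc with
  | nil => simp
  | cons t l ih =>
    rw [List.foldl_cons, ih, List.all_cons]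
    cases ok t <;> cases acc <;> simp

-- ===== VERDICT (by name: the statement is the Claim_ definition above) =====
theorem areMyInputsOkay_spec : Claim_equal_areMyInputsOkay := by
  intro s _
  show areMyInputsOkay s = areMyInputsOkay_alt s
  rw [areMyInputsOkay, areMyInputsOkay_alt]
  cases h : PySem.Str.split₀ s with
  | nil => simp
  | cons a as =>
    simp only [List.length_cons, gt_iff_lt, Nat.zero_lt_succ, if_true, decide_true, Bool.true_and]
    rw [pv_fold_all, Bool.true_and,
      show isMyInputOkay = (fun t => PySem.Chars.strIsdigit (pvDropFirstDot t.toList)) from funext pv_token]
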